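-- pv_equiv track=rewrite | github.com/f6j9yswtpk-maker/Ryu_bots | core/automator.py | _decompose_amount
-- ===== SOURCE A (Python) =====
-- AMOUNT_BUTTONS = [100, 10, 5, 1]
--
-- def _decompose_amount(target: int) -> list[int]:
--     """Break target USD into clicks of +$100, +$10, +$5, +$1."""
--     remaining = target
--     clicks = []
--     for btn in AMOUNT_BUTTONS:
--         while remaining >= btn:
--             clicks.append(btn)
--             remaining -= btn
--     return clicks
-- ===== SOURCE B (Python) =====
-- AMOUNT_BUTTONS = [100, 10, 5, 1]
--
-- def _decompose_amount(target: int) -> list[int]: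
--     """Break target USD into clicks of +$100, +$10, +$5, +$1."""
--     remaining = target
--     clicks = []
--     for btn in AMOUNT_BUTTONS:
--         if remaining >= btn:
--             count = remaining // btn
--             clicks += [btn] * count
--             remaining -= btn * count
--     return clicks
-- ===== Notes on version B (the rewrite author's own statement) =====
-- stated objective: idiomatic
-- what changed: The per-click inner while-subtraction loop is replaced by a single floor division per denomination: count = remaining // btn, emit [btn]*count at once, subtract btn*count.
import Mathlib
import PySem

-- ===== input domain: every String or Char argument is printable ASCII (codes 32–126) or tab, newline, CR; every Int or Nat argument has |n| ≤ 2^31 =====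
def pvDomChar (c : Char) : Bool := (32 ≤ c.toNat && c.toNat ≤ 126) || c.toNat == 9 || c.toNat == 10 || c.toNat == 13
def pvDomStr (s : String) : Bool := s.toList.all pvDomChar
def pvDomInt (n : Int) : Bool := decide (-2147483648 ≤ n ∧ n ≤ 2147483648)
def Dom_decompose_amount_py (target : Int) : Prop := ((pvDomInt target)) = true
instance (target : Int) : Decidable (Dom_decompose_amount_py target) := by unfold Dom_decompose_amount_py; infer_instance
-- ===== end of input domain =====

-- B replaces the per-click inner while loop with one floor division per denomination (idiomatic; same outer loop over AMOUNT_BUTTONS).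

-- ===== PORT A =====
-- AMOUNT_BUTTONS = [100, 10, 5, 1]
def pvButtons : List Int := [100, 10, 5, 1]

-- inner 'while remaining >= btn: clicks.append(btn); remaining -= btn'
def pvWhile (btn : Int) (hb : 0 < btn) (remaining : Int) (clicks : List Int) : List Int × Int :=
  if _h : btn ≤ remaining then pvWhile btn hb (remaining - btn) (clicks ++ [btn]) else (clicks, remaining)
termination_by remaining.toNat
decreasing_by omega

def decompose_amount_py (target : Int) : List Int :=
  -- for btn in AMOUNT_BUTTONS: while loop (unrolled over the 4 literal buttons)
  let s0 := ([], target)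
  let s1 := pvWhile 100 (by norm_num) s0.2 s0.1
  let s2 := pvWhile 10 (by norm_num) s1.2 s1.1
  let s3 := pvWhile 5 (by norm_num) s2.2 s2.1
  let s4 := pvWhile 1 (by norm_num) s3.2 s3.1
  s4.1

-- ===== PORT B =====
-- one fold step per denomination: single floor division, emit [btn]*count at once
def pvStep (st : List Int × Int) (btn : Int) : List Int × Int :=
  if btn ≤ st.2 then
    let count := PySem.Int.floordiv st.2 btn
    (st.1 ++ List.replicate count.toNat btn, st.2 - btn * count)
  else st

def decompose_amount_py_alt (target : Int) : List Int :=
  (pvButtons.foldl pvStep ([], target)).1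

-- ===== PRECONDITION & SPEC =====
def Spec_decompose_amount_py (target : Int) (out : List Int) : Prop := out = decompose_amount_py_alt target
instance (target : Int) (out : List Int) : Decidable (Spec_decompose_amount_py target out) := by unfold Spec_decompose_amount_py; infer_instance

-- ===== CLAIM (what is proved, stated in full; the proofs are below) =====
def Claim_equal_decompose_amount_py : Prop := ∀ (target : Int), Dom_decompose_amount_py target → Spec_decompose_amount_py target (decompose_amount_py target)

-- ===== LEMMAS AND PROOFS =====

-- ===== VERDICT (by name: the statement is the Claim_ definition above) =====
-- the while loop computes the closed form: count = floor(remaining / btn) clamped at 0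
theorem pvWhile_eq (btn : Int) (hb : 0 < btn) (remaining : Int) (clicks : List Int) :
    pvWhile btn hb remaining clicks =
      (clicks ++ List.replicate (PySem.Int.floordiv remaining btn).toNat btn,
       remaining - btn * ((PySem.Int.floordiv remaining btn).toNat : Int)) := by
  fun_induction pvWhile btn hb remaining clicks with
  | case1 remaining clicks h ih =>
      rw [ih]
      rw [PySem.Int.floordiv_eq_ediv_of_pos hb, PySem.Int.floordiv_eq_ediv_of_pos hb] at *
      have hd : remaining / btn = (remaining - btn) / btn + 1 := by
        have := Int.add_mul_ediv_right (remaining - btn) 1 (ne_of_gt hb)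
        simpa using this
      have hnn : 0 ≤ (remaining - btn) / btn := Int.ediv_nonneg (by omega) (le_of_lt hb)
      have ht : (remaining / btn).toNat = ((remaining - btn) / btn).toNat + 1 := by omega
      rw [ht]
      refine Prod.ext ?_ ?_
      · simp [List.replicate_succ, List.append_assoc]
      · simp only []
        push_cast
        ring
  | case2 remaining clicks h =>
      rw [PySem.Int.floordiv_eq_ediv_of_pos hb]
      have : remaining / btn < 1 := by
        have := PySem.Int.floordiv_lt_iff_lt_mul (a := remaining) (b := btn) (q := 1) hb
        rw [PySem.Int.floordiv_eq_ediv_of_pos hb] at this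
        exact this.mpr (by omega)
      have ht : (remaining / btn).toNat = 0 := by omega
      simp [ht]

theorem pvWhile_eq_step (btn : Int) (hb : 0 < btn) (st : List Int × Int) :
    pvWhile btn hb st.2 st.1 = pvStep st btn := by
  rw [pvWhile_eq, pvStep]
  split_ifs with h
  · have hnn : 0 ≤ PySem.Int.floordiv st.2 btn := by
      rw [PySem.Int.floordiv_eq_ediv_of_pos hb]; exact Int.ediv_nonneg (by omega) (le_of_lt hb)
    simp [Int.toNat_of_nonneg hnn]
  · have : PySem.Int.floordiv st.2 btn < 1 :=
      (PySem.Int.floordiv_lt_iff_lt_mul hb).mpr (by omega)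
    have ht : (PySem.Int.floordiv st.2 btn).toNat = 0 := by omega
    simp [ht]

theorem decompose_amount_py_spec : Claim_equal_decompose_amount_py := by
  intro target _
  unfold Spec_decompose_amount_py decompose_amount_py decompose_amount_py_alt pvButtons
  simp only [List.foldl]
  rw [pvWhile_eq_step 100 (by norm_num) ([], target),
      pvWhile_eq_step 10 (by norm_num), pvWhile_eq_step 5 (by norm_num),
      pvWhile_eq_step 1 (by norm_num)]
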